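-- pv_equiv track=rewrite | github.com/zzyustcrice/halite3 | reinforcement-learning-master/game_environments/Halite/CombatBot.py | handle_list
-- ===== SOURCE A (Python) =====
-- HM_ENT_FEATURES = 5
--
-- def handle_list(l):
--     new_list = []
--     for i in range(HM_ENT_FEATURES):
--             try:
--                     new_list.append(l[i])
--             except:
--                     new_list.append(-99)
--     return new_list
-- ===== SOURCE B (Python) =====
-- HM_ENT_FEATURES = 5
--
-- def handle_list(l):
--     return (list(l[:HM_ENT_FEATURES]) + [-99] * HM_ENT_FEATURES)[:HM_ENT_FEATURES]
-- ===== Notes on version B (the rewrite author's own statement) =====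
-- stated objective: simpler
-- what changed: Replaces the per-index loop with try/except by a single slice-and-pad expression (take 5, append five -99s, take 5 again).
import Mathlib
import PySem

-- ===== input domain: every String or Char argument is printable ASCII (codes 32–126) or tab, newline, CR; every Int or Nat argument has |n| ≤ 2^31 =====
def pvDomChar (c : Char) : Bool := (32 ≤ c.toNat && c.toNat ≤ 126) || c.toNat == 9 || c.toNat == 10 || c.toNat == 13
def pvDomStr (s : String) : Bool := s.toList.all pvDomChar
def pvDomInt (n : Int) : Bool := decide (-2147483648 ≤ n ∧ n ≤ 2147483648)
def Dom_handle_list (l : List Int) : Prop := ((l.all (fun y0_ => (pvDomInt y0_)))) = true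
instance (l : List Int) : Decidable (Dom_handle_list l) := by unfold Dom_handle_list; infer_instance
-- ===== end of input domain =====

-- B replaces A's per-index loop with try/except by a single slice-and-pad expression (simpler, same cost).


-- ===== PORT A =====
-- A: loop i in range(5), append l[i] or -99 on IndexError
def handle_list (l : List Int) : List Int :=
  (PySem.List.pyRange 0 5 1).foldl
    (fun new_list i =>
      new_list ++ [match PySem.List.pyGet? l i with
                   | some x => x
                   | none => -99]) []

-- ===== PORT B =====
-- B: slice-and-pad: (l[:5] + [-99]*5)[:5]
def handle_list_alt (l : List Int) : List Int :=
  (PySem.List.slice l (some 0) (some 5) ++ List.replicate 5 (-99)).take 5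

-- ===== PRECONDITION & SPEC =====
def Spec_handle_list (l : List Int) (out : List Int) : Prop := out = handle_list_alt l
instance (l : List Int) (out : List Int) : Decidable (Spec_handle_list l out) := by unfold Spec_handle_list; infer_instance

-- ===== CLAIM (what is proved, stated in full; the proofs are below) =====
def Claim_equal_handle_list : Prop := ∀ (l : List Int), Dom_handle_list l → Spec_handle_list l (handle_list l)

-- ===== LEMMAS AND PROOFS =====

-- ===== VERDICT (by name: the statement is the Claim_ definition above) =====
theorem handle_list_spec : Claim_equal_handle_list := by
  intro l _
  unfold Spec_handle_list handle_list handle_list_alt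
  match l with
  | [] => decide
  | [a] => simp [PySem.List.pyRange, PySem.List.slice, PySem.List.pyGet?, PySem.List.pyIdx?, show List.range 5 = [0,1,2,3,4] from rfl]
  | [a,b] => simp [PySem.List.pyRange, PySem.List.slice, PySem.List.pyGet?, PySem.List.pyIdx?, show List.range 5 = [0,1,2,3,4] from rfl]
  | [a,b,c] => simp [PySem.List.pyRange, PySem.List.slice, PySem.List.pyGet?, PySem.List.pyIdx?, show List.range 5 = [0,1,2,3,4] from rfl]
  | [a,b,c,d] => simp [PySem.List.pyRange, PySem.List.slice, PySem.List.pyGet?, PySem.List.pyIdx?, show List.range 5 = [0,1,2,3,4] from rfl]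
  | a::b::c::d::e::rest =>
      simp [PySem.List.pyRange, PySem.List.slice, PySem.List.pyGet?, PySem.List.pyIdx?,
        show List.range 5 = [0,1,2,3,4] from rfl]
      split_ifs <;> simp_all <;> omega
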